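-- pv_equiv track=rewrite | github.com/afouda11/AugerNet | cebe_pred/publication_plots_si_tables.py | _classify_config
-- ===== SOURCE A (Python) =====
-- _FEAT_DIM = {
--     '0': 200,   # skipatom_200
--     '1': 30,    # skipatom_30
--     '2': 5,     # onehot
--     '3': 1,     # atomic_be
--     '4': 1,     # mol_be
--     '5': 1,     # e_score
--     '6': 8,     # env_onehot (approx)
--     '7': 256,   # morgan_fp
-- }
--
-- def _classify_config(feature_keys_str):
--     """Classify a feature_keys string into (atom_type_key, has_be, has_eneg).
--
--     Returns
--     -------
--     atom_type_key : str or None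
--         '0', '1', '2', or None.
--     has_be : bool
--         Whether key '3' (atomic_be) is present.
--     has_eneg : bool
--         Whether key '5' (e_score) is present.
--     d_x : int
--         Total node-feature dimension.
--     """
--     keys = list(feature_keys_str)  # e.g. '035' → ['0', '3', '5']
--     atom_type_key = None
--     for k in ('0', '1', '2'):
--         if k in keys:
--             atom_type_key = k
--             break
--     has_be   = '3' in keys
--     has_eneg = '5' in keys
--     d_x = sum(_FEAT_DIM.get(k, 0) for k in keys)
--     return atom_type_key, has_be, has_eneg, d_x
-- ===== SOURCE B (Python) =====
-- _FEAT_DIM = {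
--     '0': 200, '1': 30, '2': 5, '3': 1,
--     '4': 1, '5': 1, '6': 8, '7': 256,
-- }
--
-- def _classify_config(feature_keys_str):
--     seen0 = seen1 = seen2 = has_be = has_eneg = False
--     d_x = 0
--     for ch in feature_keys_str:
--         d_x += _FEAT_DIM.get(ch, 0)
--         if ch == '0':
--             seen0 = True
--         elif ch == '1':
--             seen1 = True
--         elif ch == '2':
--             seen2 = True
--         elif ch == '3':
--             has_be = True
--         elif ch == '5':
--             has_eneg = True
--     atom_type_key = '0' if seen0 else '1' if seen1 else '2' if seen2 else None
--     return atom_type_key, has_be, has_eneg, d_x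
-- ===== Notes on version B (the rewrite author's own statement) =====
-- stated objective: alternative
-- what changed: B replaces A's five separate scans (three membership tests for the atom-type priority chain, two membership tests for the flags, and a generator-sum over the dict) with a single loop over the string that accumulates the dimension and five boolean flags, choosing the atom type afterwards by fixed priority.
import Mathlib
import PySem

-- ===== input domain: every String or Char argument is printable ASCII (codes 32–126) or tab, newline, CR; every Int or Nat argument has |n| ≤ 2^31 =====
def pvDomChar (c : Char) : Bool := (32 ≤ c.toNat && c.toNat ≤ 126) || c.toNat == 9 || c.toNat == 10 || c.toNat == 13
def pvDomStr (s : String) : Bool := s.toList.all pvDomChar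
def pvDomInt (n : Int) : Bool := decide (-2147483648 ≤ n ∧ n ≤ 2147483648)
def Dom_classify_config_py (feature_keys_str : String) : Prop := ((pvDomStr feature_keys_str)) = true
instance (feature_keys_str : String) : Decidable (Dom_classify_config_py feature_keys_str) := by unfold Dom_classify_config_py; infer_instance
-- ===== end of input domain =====

-- B replaces A's five separate scans with one fold accumulating the dimension and five flags; alternative decomposition, same O(n) cost.

-- ===== PORT A =====
def pyFEAT_DIM : PySem.Dict Char Int :=
  PySem.Dict.ofList [('0', 200), ('1', 30), ('2', 5), ('3', 1), ('4', 1), ('5', 1), ('6', 8), ('7', 256)]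

def classify_config_py (feature_keys_str : String) : Option String × Bool × Bool × Int :=
  let keys := feature_keys_str.toList
  -- for k in ('0','1','2'): if k in keys: atom_type_key = k; break
  let atom_type_key : Option String :=
    if keys.contains '0' then some "0"
    else if keys.contains '1' then some "1"
    else if keys.contains '2' then some "2"
    else none
  let has_be := keys.contains '3'
  let has_eneg := keys.contains '5'
  let d_x := (keys.map (fun k => pyFEAT_DIM.getD k 0)).sum
  (atom_type_key, has_be, has_eneg, d_x)

-- ===== PORT B =====
-- _FEAT_DIM is one shared module-level constant in the Python source; both ports use pyFEAT_DIM.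
structure PvSt where
  s0 : Bool
  s1 : Bool
  s2 : Bool
  be : Bool
  en : Bool
  d  : Int
deriving DecidableEq, Repr

def pvStep (st : PvSt) (ch : Char) : PvSt :=
  let d := st.d + pyFEAT_DIM.getD ch 0
  if ch = '0' then { st with s0 := true, d := d }
  else if ch = '1' then { st with s1 := true, d := d }
  else if ch = '2' then { st with s2 := true, d := d }
  else if ch = '3' then { st with be := true, d := d }
  else if ch = '5' then { st with en := true, d := d }
  else { st with d := d }

def classify_config_py_alt (feature_keys_str : String) : Option String × Bool × Bool × Int :=
  let st := feature_keys_str.toList.foldl pvStep ⟨false, false, false, false, false, 0⟩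
  let atom_type_key : Option String :=
    if st.s0 then some "0" else if st.s1 then some "1" else if st.s2 then some "2" else none
  (atom_type_key, st.be, st.en, st.d)

-- ===== PRECONDITION & SPEC =====
def Spec_classify_config_py (feature_keys_str : String) (out : Option String × Bool × Bool × Int) : Prop := out = classify_config_py_alt feature_keys_str
instance (feature_keys_str : String) (out : Option String × Bool × Bool × Int) : Decidable (Spec_classify_config_py feature_keys_str out) := by unfold Spec_classify_config_py; infer_instance

-- ===== CLAIM (what is proved, stated in full; the proofs are below) =====
def Claim_equal_classify_config_py : Prop := ∀ (feature_keys_str : String), Dom_classify_config_py feature_keys_str → Spec_classify_config_py feature_keys_str (classify_config_py feature_keys_str)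

-- ===== LEMMAS AND PROOFS =====

lemma pvStep_inv (l : List Char) (st : PvSt) :
    l.foldl pvStep st =
      ⟨st.s0 || l.contains '0', st.s1 || l.contains '1', st.s2 || l.contains '2',
       st.be || l.contains '3', st.en || l.contains '5',
       st.d + (l.map (fun k => pyFEAT_DIM.getD k 0)).sum⟩ := by
  induction l generalizing st with
  | nil => simp
  | cons c l ih =>
    simp only [List.foldl_cons, ih, List.contains_cons, List.map_cons, List.sum_cons]
    simp only [pvStep]
    split_ifs with h0 h1 h2 h3 h5
    case neg =>
      have e0 : ('0' == c) = false := beq_eq_false_iff_ne.mpr (Ne.symm h0)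
      have e1 : ('1' == c) = false := beq_eq_false_iff_ne.mpr (Ne.symm h1)
      have e2 : ('2' == c) = false := beq_eq_false_iff_ne.mpr (Ne.symm h2)
      have e3 : ('3' == c) = false := beq_eq_false_iff_ne.mpr (Ne.symm h3)
      have e5 : ('5' == c) = false := beq_eq_false_iff_ne.mpr (Ne.symm h5)
      simp [e0, e1, e2, e3, e5]; ring
    all_goals simp_all <;> ring

theorem classify_config_py_spec : Claim_equal_classify_config_py := by
  intro s _
  unfold Spec_classify_config_py classify_config_py classify_config_py_alt
  rw [pvStep_inv]
  simp
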